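-- pv_equiv track=rewrite | github.com/zhaozengqing4364-bit/medical-query-system | db_backend.py | _escape_literal_percents
-- ===== SOURCE A (Python) =====
-- def _escape_literal_percents(sql: str) -> str:
--     """
--     psycopg2 使用 pyformat，占位符是 %s。
--     非占位符用途的 '%' 必须转义为 '%%'，否则会触发参数解析异常。
--     """
--     out = []
--     i = 0
--     while i < len(sql):
--         ch = sql[i]
--         if ch != "%":
--             out.append(ch)
--             i += 1
--             continue
--
--         if i + 1 < len(sql):
--             nxt = sql[i + 1]
--             # 已转义的 %% 和位置占位符 %s 保持不变。
--             if nxt == "%" or nxt == "s":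
--                 out.append("%")
--                 out.append(nxt)
--                 i += 2
--                 continue
--             # 兼容命名占位符 %(name)s 场景。
--             if nxt == "(":
--                 out.append("%")
--                 i += 1
--                 continue
--
--         out.append("%%")
--         i += 1
--     return "".join(out)
-- ===== SOURCE B (Python) =====
-- def _escape_literal_percents(sql: str) -> str:
--     # Split on '%': each boundary between adjacent parts is one literal '%'.
--     # Walk the boundaries: an empty part with a successor means '%%' (keep it,
--     # consuming both boundaries); a part starting with 's' or '(' is a
--     # placeholder (keep single '%'); anything else is a lone '%' to double.
--     parts = sql.split("%")
--     out = [parts[0]]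
--     n = len(parts)
--     k = 1
--     while k < n:
--         p = parts[k]
--         if p == "" and k + 1 < n:
--             out.append("%%")
--             out.append(parts[k + 1])
--             k += 2
--         elif p[:1] in ("s", "("):
--             out.append("%")
--             out.append(p)
--             k += 1
--         else:
--             out.append("%%")
--             out.append(p)
--             k += 1
--     return "".join(out)
-- ===== Notes on version B (the rewrite author's own statement) =====
-- stated objective: faster
-- what changed: Replaces A's per-character index/while scan with one str.split('%') plus a walk over the parts: each boundary between adjacent parts is one percent sign, classified as an escaped pair, a placeholder (next part starts with 's' or '('), or a lone percent to double.
import Mathlib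
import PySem

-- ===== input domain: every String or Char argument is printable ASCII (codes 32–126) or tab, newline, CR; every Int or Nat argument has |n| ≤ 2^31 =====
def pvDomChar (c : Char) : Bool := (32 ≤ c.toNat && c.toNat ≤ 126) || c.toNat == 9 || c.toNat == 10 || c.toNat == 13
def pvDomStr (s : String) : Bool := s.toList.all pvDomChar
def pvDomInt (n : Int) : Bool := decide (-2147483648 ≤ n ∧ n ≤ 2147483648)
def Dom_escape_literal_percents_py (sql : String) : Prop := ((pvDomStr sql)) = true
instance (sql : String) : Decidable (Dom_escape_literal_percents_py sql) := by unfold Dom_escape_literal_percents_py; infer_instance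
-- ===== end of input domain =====

-- B replaces A's per-character index loop by a split('%')-and-rejoin walk over the
-- parts; equivalence of the return values is proved for all inputs (A is total).

-- ===== PORT A =====
-- the while-loop of A: `l` is the remaining characters (sql[i:]), `out` the list of
-- emitted strings; branches in A's order.
def pvAEsc : List Char → List String → List String
  | [], out => out
  | ch :: rest, out =>
    if ch ≠ '%' then pvAEsc rest (out ++ [String.ofList [ch]])
    else
      match rest with
      | nxt :: rest2 =>
        if nxt = '%' ∨ nxt = 's' then pvAEsc rest2 (out ++ ["%", String.ofList [nxt]])
        else if nxt = '(' then pvAEsc (nxt :: rest2) (out ++ ["%"])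
        else pvAEsc (nxt :: rest2) (out ++ ["%%"])
      | [] => out ++ ["%%"]   -- i+1 ≥ len: append "%%" and the loop ends

def escape_literal_percents_py (sql : String) : String :=
  PySem.Str.join "" (pvAEsc sql.toList [])

-- ===== PORT B =====
-- the while-loop of B over parts[1:]: each boundary between adjacent parts is one '%'.
def pvBWalk : List (List Char) → List String
  | [] => []
  | p :: rest =>
    if p = [] then
      match rest with
      | q :: rest2 => "%%" :: String.ofList q :: pvBWalk rest2   -- p == '' and k+1 < n
      | [] => "%%" :: String.ofList p :: pvBWalk []              -- ''[:1] not in ('s','('): else branch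
    else if p.head! = 's' ∨ p.head! = '(' then
      "%" :: String.ofList p :: pvBWalk rest
    else
      "%%" :: String.ofList p :: pvBWalk rest

def escape_literal_percents_py_alt (sql : String) : String :=
  let parts := sql.toList.splitOn '%'   -- sql.split('%')
  PySem.Str.join "" (String.ofList parts.head! :: pvBWalk parts.tail)

-- ===== PRECONDITION & SPEC =====
def Spec_escape_literal_percents_py (sql : String) (out : String) : Prop := out = escape_literal_percents_py_alt sql
instance (sql : String) (out : String) : Decidable (Spec_escape_literal_percents_py sql out) := by unfold Spec_escape_literal_percents_py; infer_instance

-- ===== CLAIM (what is proved, stated in full; the proofs are below) =====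
def Claim_equal_escape_literal_percents_py : Prop := ∀ (sql : String), Dom_escape_literal_percents_py sql → Spec_escape_literal_percents_py sql (escape_literal_percents_py sql)

-- ===== LEMMAS AND PROOFS =====

-- "".join at the char level
lemma pv_join_empty_sep (ps : List (List Char)) : PySem.Chars.join [] ps = ps.flatten := by
  induction ps with
  | nil => simp [PySem.Chars.join_nil]
  | cons p rest ih =>
    cases rest with
    | nil => simp [PySem.Chars.join_singleton]
    | cons q r =>
      rw [PySem.Chars.join_cons_cons]
      rw [List.flatten_cons, ← ih]
      simp

-- split('%') unfolding facts
lemma pv_splitOn_ne_nil (l : List Char) : l.splitOn '%' ≠ [] := List.splitOnP_ne_nil _ _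

lemma pv_splitOn_cons_pct (t : List Char) : ('%' :: t).splitOn '%' = [] :: t.splitOn '%' := by
  simp [List.splitOn, List.splitOnP_cons]

lemma pv_splitOn_cons_ne (c : Char) (t : List Char) (h : c ≠ '%') :
    (c :: t).splitOn '%' = (c :: (t.splitOn '%').head!) :: (t.splitOn '%').tail := by
  have hne := pv_splitOn_ne_nil t
  simp only [List.splitOn, List.splitOnP_cons] at *
  rcases hl : List.splitOnP (fun b => b == '%') t with _ | ⟨p, rest⟩
  · exact absurd hl hne
  · simp [h]

-- strong induction on the length of a character list (used by both inductions below)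
lemma pv_length_ind {P : List Char → Prop}
    (ind : ∀ l : List Char, (∀ m : List Char, m.length < l.length → P m) → P l)
    (l : List Char) : P l := WellFounded.Nat.fix List.length ind l

-- the accumulator of A's loop factors out
lemma pvAEsc_acc : ∀ (l : List Char) (out : List String), pvAEsc l out = out ++ pvAEsc l [] := by
  intro l
  induction l using pv_length_ind with
  | ind l ih =>
    intro out
    match l with
    | [] => simp [pvAEsc]
    | ch :: rest =>
      by_cases hc : ch = '%'
      · subst hc
        match rest with
        | [] => simp [pvAEsc]
        | nxt :: rest2 =>
          have hlt2 : rest2.length < ('%' :: nxt :: rest2).length := by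
            simp only [List.length_cons]; omega
          have hlt1 : (nxt :: rest2).length < ('%' :: nxt :: rest2).length := by
            simp only [List.length_cons]; omega
          by_cases h1 : nxt = '%' ∨ nxt = 's'
          · simp only [pvAEsc, if_neg (by decide : ¬('%' ≠ '%')), if_pos h1]
            rw [ih rest2 hlt2 (out ++ ["%", String.ofList [nxt]]),
                ih rest2 hlt2 ([] ++ ["%", String.ofList [nxt]])]
            simp
          · by_cases h2 : nxt = '('
            · simp only [pvAEsc, if_neg (by decide : ¬('%' ≠ '%')), if_neg h1, if_pos h2]
              rw [ih (nxt :: rest2) hlt1 (out ++ ["%"]), ih (nxt :: rest2) hlt1 ([] ++ ["%"])]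
              simp
            · simp only [pvAEsc, if_neg (by decide : ¬('%' ≠ '%')), if_neg h1, if_neg h2]
              rw [ih (nxt :: rest2) hlt1 (out ++ ["%%"]), ih (nxt :: rest2) hlt1 ([] ++ ["%%"])]
              simp
      · have hlt : rest.length < (ch :: rest).length := by
          simp only [List.length_cons]; omega
        conv_lhs => rw [pvAEsc.eq_def]
        conv_rhs => rw [pvAEsc.eq_def]
        simp only [if_pos (hc : ch ≠ '%')]
        rw [ih rest hlt (out ++ [String.ofList [ch]]), ih rest hlt ([] ++ [String.ofList [ch]])]
        simp

-- the flattened output of A's loop on the remaining characters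
def pvFA (l : List Char) : List Char := ((pvAEsc l []).map String.toList).flatten

-- the flattened output of B from the split of the remaining characters
def pvFB (l : List Char) : List Char :=
  (l.splitOn '%').head! ++ ((pvBWalk (l.splitOn '%').tail).map String.toList).flatten

-- one-step unfoldings of A's loop (accumulator already factored out)
lemma pvA_ne (c : Char) (t : List Char) (hc : ¬ c = '%') :
    pvAEsc (c :: t) [] = [String.ofList [c]] ++ pvAEsc t [] := by
  rw [pvAEsc.eq_def]
  simp only [if_pos (hc : c ≠ '%')]
  simpa using pvAEsc_acc t [String.ofList [c]]

lemma pvA_pp (u : List Char) : pvAEsc ('%' :: '%' :: u) [] = ["%", "%"] ++ pvAEsc u [] := by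
  rw [pvAEsc.eq_def]
  norm_num
  simpa using pvAEsc_acc u ["%", String.ofList ['%']]

lemma pvA_ps (u : List Char) : pvAEsc ('%' :: 's' :: u) [] = ["%", "s"] ++ pvAEsc u [] := by
  rw [pvAEsc.eq_def]
  norm_num
  simpa using pvAEsc_acc u ["%", String.ofList ['s']]

lemma pvA_paren (u : List Char) : pvAEsc ('%' :: '(' :: u) [] = ["%"] ++ pvAEsc ('(' :: u) [] := by
  rw [pvAEsc.eq_def]
  norm_num
  simpa using pvAEsc_acc ('(' :: u) ["%"]

lemma pvA_other (c : Char) (u : List Char) (h1 : ¬(c = '%' ∨ c = 's')) (h2 : ¬ c = '(') :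
    pvAEsc ('%' :: c :: u) [] = ["%%"] ++ pvAEsc (c :: u) [] := by
  rw [pvAEsc.eq_def]
  simp only [if_neg (by decide : ¬('%' ≠ '%')), if_neg h1, if_neg h2]
  simpa using pvAEsc_acc (c :: u) ["%%"]

-- one-step unfoldings of B's walk
lemma pvB_empty_cons (q : List Char) (r : List (List Char)) :
    pvBWalk ([] :: q :: r) = "%%" :: String.ofList q :: pvBWalk r := by
  rw [pvBWalk.eq_def]; simp

lemma pvB_cons (c : Char) (h : List Char) (tl : List (List Char)) :
    pvBWalk ((c :: h) :: tl) =
      (if c = 's' ∨ c = '(' then "%" else "%%") :: String.ofList (c :: h) :: pvBWalk tl := by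
  rw [pvBWalk.eq_def]
  by_cases hs : c = 's' ∨ c = '('
  · simp [hs]
  · simp [hs]

-- main induction: A's flattened output equals B's, character list by character list
lemma pv_main : ∀ (l : List Char), pvFA l = pvFB l := by
  intro l
  induction l using pv_length_ind with
  | ind l ih =>
    match l with
    | [] => decide
    | c :: t =>
      by_cases hc : c = '%'
      · subst hc
        match t with
        | [] => decide
        | c2 :: u =>
          have hlt : u.length < ('%' :: c2 :: u).length := by
            simp only [List.length_cons]; omega
          have hIH := ih u hlt
          have hne := pv_splitOn_ne_nil u
          rcases hu2 : u.splitOn '%' with _ | ⟨h, tl⟩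
          · exact absurd hu2 hne
          rw [pvFB, hu2] at hIH
          simp only [List.head!_cons, List.tail_cons] at hIH
          by_cases h2 : c2 = '%'
          · subst h2
            rw [pvFA, pvA_pp, pvFB, pv_splitOn_cons_pct, pv_splitOn_cons_pct, hu2,
                List.head!_cons, List.tail_cons, pvB_empty_cons]
            simp only [pvFA] at hIH
            simp [hIH]
          · rw [pvFB, pv_splitOn_cons_pct, pv_splitOn_cons_ne c2 u h2, hu2,
                List.head!_cons, List.tail_cons, List.head!_cons, List.tail_cons, pvB_cons]
            by_cases hs : c2 = 's' ∨ c2 = '('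
            · rcases hs with hs | hs
              · subst hs
                rw [pvFA, pvA_ps]
                simp only [pvFA] at hIH
                simp [hIH]
              · subst hs
                rw [pvFA, pvA_paren, pvA_ne '(' u (by decide)]
                simp only [pvFA] at hIH
                simp [hIH]
            · have h1 : ¬(c2 = '%' ∨ c2 = 's') := by
                intro hx; rcases hx with hx | hx
                · exact h2 hx
                · exact hs (Or.inl hx)
              have h3 : ¬ c2 = '(' := fun hx => hs (Or.inr hx)
              rw [pvFA, pvA_other c2 u h1 h3, pvA_ne c2 u h2, if_neg hs]
              simp only [pvFA] at hIH
              simp [hIH]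
      · have hlt : t.length < (c :: t).length := by
          simp only [List.length_cons]; omega
        have hIH := ih t hlt
        have hne := pv_splitOn_ne_nil t
        rcases ht : t.splitOn '%' with _ | ⟨h, tl⟩
        · exact absurd ht hne
        rw [pvFB, ht] at hIH
        simp only [List.head!_cons, List.tail_cons] at hIH
        rw [pvFA, pvA_ne c t hc, pvFB, pv_splitOn_cons_ne c t hc, ht,
            List.head!_cons, List.tail_cons, List.head!_cons, List.tail_cons]
        simp only [pvFA] at hIH
        simp [hIH]

-- ===== VERDICT (by name: the statement is the Claim_ definition above) =====
theorem escape_literal_percents_py_spec : Claim_equal_escape_literal_percents_py := by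
  intro sql _
  unfold Spec_escape_literal_percents_py escape_literal_percents_py escape_literal_percents_py_alt
  rw [← String.toList_inj]
  have hm := pv_main sql.toList
  simp only [pvFA, pvFB] at hm
  simp only [PySem.Str.toList_join, String.toList_empty, pv_join_empty_sep, List.map_cons,
    List.flatten_cons, String.toList_ofList]
  exact hm
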